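-- pv_equiv track=rewrite | github.com/ugadal/AOC | 2023/d14.py | compute
-- ===== SOURCE A (Python) =====
-- def compute(G):
-- 	W=list(G)
-- 	t=0
-- 	high=len(W)
-- 	score=range(high,0,-1)
-- 	for col in zip(*W):
-- 		for c,v in zip(col,score):
-- 			if c=="O":t+=v
-- 	return t
-- ===== SOURCE B (Python) =====
-- def compute(G):
--     W = list(G)
--     n = len(W)
--     w = min((len(r) for r in W), default=0)
--     return sum((n - i) * r[:w].count("O") for i, r in enumerate(W))
-- ===== Notes on version B (the rewrite author's own statement) =====
-- stated objective: simpler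
-- what changed: B walks the grid row-major, multiplying each row's weight by its count of 'O' within the effective width, instead of A's transpose (zip(*W)) followed by a per-cell inner loop over each column.
import Mathlib
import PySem

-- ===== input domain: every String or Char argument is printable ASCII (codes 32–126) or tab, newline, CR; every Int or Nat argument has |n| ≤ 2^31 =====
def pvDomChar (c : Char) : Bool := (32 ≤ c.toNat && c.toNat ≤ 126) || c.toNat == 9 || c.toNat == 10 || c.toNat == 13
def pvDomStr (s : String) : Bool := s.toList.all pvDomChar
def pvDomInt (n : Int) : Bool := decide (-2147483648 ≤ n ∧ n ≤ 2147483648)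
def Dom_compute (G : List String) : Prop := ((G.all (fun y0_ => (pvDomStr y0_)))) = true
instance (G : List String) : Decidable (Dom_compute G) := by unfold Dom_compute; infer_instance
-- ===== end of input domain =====

-- B computes the same weighted 'O'-score row-major (row weight × per-row count of 'O' within the
-- effective width) instead of A's transpose (zip(*W)) followed by per-cell column loops; objective: simpler.


-- ===== PORT A =====
-- hand-port of Python's zip(*rows): exactly min-row-length tuples; tuple j holds row r's r[j]
-- (the getD default ' ' is never read: j < every row's length). Exact for zip of char rows.
def pyMinLen (rows : List (List Char)) : Nat :=
  match rows with
  | [] => 0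
  | r :: rs => rs.foldl (fun m s => min m s.length) r.length

def pyZipStar (rows : List (List Char)) : List (List Char) :=
  (List.range (pyMinLen rows)).map (fun j => rows.map (fun r => r.getD j ' '))

def compute (G : List String) : Int :=
  let W : List (List Char) := G.map String.toList   -- W = list(G)
  let t : Int := 0
  let high := W.length
  let score := PySem.List.pyRange (high : Int) 0 (-1)
  (pyZipStar W).foldl (fun t col =>
    (col.zip score).foldl (fun t cv => if cv.1 = 'O' then t + cv.2 else t) t) t

-- ===== PORT B =====
def compute_alt (G : List String) : Int :=
  let W : List (List Char) := G.map String.toList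
  let n := W.length
  let w : Int := PySem.List.minD (W.map (fun r => PySem.List.len r)) (fun x => x) 0
  ((PySem.List.enumerate W).map (fun p =>
      ((n : Int) - p.1) * ((PySem.List.count (PySem.List.slice p.2 none (some w)) 'O' : Nat) : Int))).sum

-- ===== PRECONDITION & SPEC =====
def Spec_compute (G : List String) (out : Int) : Prop := out = compute_alt G
instance (G : List String) (out : Int) : Decidable (Spec_compute G out) := by unfold Spec_compute; infer_instance

-- ===== CLAIM (what is proved, stated in full; the proofs are below) =====
def Claim_equal_compute : Prop := ∀ (G : List String), Dom_compute G → Spec_compute G (compute G)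

-- ===== LEMMAS AND PROOFS =====

-- the common cell value: weight (n - i) if the cell at row i, column j is 'O', else 0
def pvCell (L : List (List Char)) (n i j : Nat) : Int :=
  if (L.getD i []).getD j ' ' = 'O' then (n : Int) - (i : Int) else 0

-- min? over the cast row lengths is the Nat fold of min
theorem pv_min_fold (rs : List (List Char)) : ∀ (a : Nat),
    PySem.List.min? (((a : Int)) :: rs.map (fun t => PySem.List.len t)) (fun x => x)
      = some (((rs.foldl (fun m s => min m s.length) a : Nat) : Int)) := by
  induction rs with
  | nil => intro a; rfl
  | cons s ss ih =>
    intro a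
    have key : PySem.List.min? (((a : Int)) :: (s :: ss).map (fun t => PySem.List.len t)) (fun x => x)
        = PySem.List.min? ((((min a s.length : Nat) : Int)) :: ss.map (fun t => PySem.List.len t)) (fun x => x) := by
      simp only [PySem.List.min?, List.map_cons, List.foldl_cons]
      congr 1
      show (if ((s.length : Int)) < ((a : Int)) then some ((s.length : Int)) else some ((a : Int)))
          = some (((min a s.length : Nat) : Int))
      split_ifs with h <;> (congr 1; omega)
    rw [key, ih]
    simp [List.foldl_cons]

-- B's width (min of row lengths, default 0) is A's zip(*W) width
theorem pv_minD_eq_minLen (W : List (List Char)) :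
    PySem.List.minD (W.map (fun r => PySem.List.len r)) (fun x => x) 0 = (pyMinLen W : Int) := by
  cases W with
  | nil => rfl
  | cons r rs =>
    show (PySem.List.min? (((r.length : Int)) :: rs.map (fun t => PySem.List.len t)) (fun x => x)).getD 0 = _
    rw [pv_min_fold rs r.length]
    rfl

theorem pv_foldl_min_le_init (rs : List (List Char)) : ∀ (a : Nat),
    rs.foldl (fun m s => min m s.length) a ≤ a := by
  induction rs with
  | nil => intro a; simp
  | cons s ss ih => intro a; exact le_trans (ih _) (min_le_left _ _)

theorem pv_foldl_min_le_mem (rs : List (List Char)) : ∀ (a : Nat) (r : List Char), r ∈ rs →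
    rs.foldl (fun m s => min m s.length) a ≤ r.length := by
  induction rs with
  | nil => intro a r hr; cases hr
  | cons s ss ih =>
    intro a r hr
    rcases List.mem_cons.mp hr with h | h
    · subst h; exact le_trans (pv_foldl_min_le_init ss _) (min_le_right _ _)
    · exact ih _ _ h

-- every row is at least as long as the zip(*W) width
theorem pv_minLen_le (W : List (List Char)) (r : List Char) (hr : r ∈ W) :
    pyMinLen W ≤ r.length := by
  cases W with
  | nil => cases hr
  | cons s ss =>
    rcases List.mem_cons.mp hr with h | h
    · subst h; exact pv_foldl_min_le_init ss _
    · exact pv_foldl_min_le_mem ss _ _ h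

theorem pv_map_eq_map_range {β : Type} (xs : List (List Char)) (f : List Char → β) :
    xs.map f = (List.range xs.length).map (fun k => f (xs.getD k [])) := by
  apply List.ext_getElem
  · simp
  · intro k h1 h2
    simp only [List.getElem_map, List.getElem_range]
    congr 1
    exact (List.getD_eq_getElem xs [] (by simpa using h1)).symm

theorem pv_sum_range (n : Nat) (f : Nat → Int) :
    ((List.range n).map f).sum = ∑ i ∈ Finset.range n, f i := rfl

-- A as a double sum: columns outside, rows inside
theorem pv_A_sum (G : List String) :
    compute G =
      ∑ j ∈ Finset.range (pyMinLen (G.map String.toList)),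
        ∑ i ∈ Finset.range (G.map String.toList).length,
          pvCell (G.map String.toList) (G.map String.toList).length i j := by
  set L := G.map String.toList with hL
  have hscore : PySem.List.pyRange ((L.length : Int)) 0 (-1)
      = (List.range L.length).map (fun k : Nat => ((L.length : Int)) - (k : Int)) := by
    rw [PySem.List.pyRange_neg_one]
    have h0 : (((L.length : Int)) - 0).toNat = L.length := by omega
    rw [h0]
  have hinner : ∀ (j : Nat) (t : Int),
      ((L.map (fun r => r.getD j ' ')).zip ((List.range L.length).map (fun k : Nat => ((L.length : Int)) - (k : Int)))).foldl
          (fun t cv => if cv.1 = 'O' then t + cv.2 else t) t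
      = t + ((List.range L.length).map (fun k => pvCell L L.length k j)).sum := by
    intro j t
    rw [pv_map_eq_map_range L (fun r => r.getD j ' '), List.zip_map', List.foldl_map]
    have hstep : (fun (t : Int) (k : Nat) =>
          if ((L.getD k []).getD j ' ', ((L.length : Int)) - k).1 = 'O'
          then t + ((L.getD k []).getD j ' ', ((L.length : Int)) - k).2 else t)
        = fun (t : Int) (k : Nat) => t + pvCell L L.length k j := by
      funext t k
      unfold pvCell
      split_ifs <;> simp
    rw [hstep, PySem.List.foldl_add]
  show (pyZipStar L).foldl _ _ = _
  unfold pyZipStar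
  rw [List.foldl_map]
  have houter : (fun (t : Int) (j : Nat) =>
        ((L.map (fun r => r.getD j ' ')).zip (PySem.List.pyRange ((L.length : Int)) 0 (-1))).foldl
          (fun t cv => if cv.1 = 'O' then t + cv.2 else t) t)
      = fun (t : Int) (j : Nat) => t + ((List.range L.length).map (fun k => pvCell L L.length k j)).sum := by
    funext t j
    rw [hscore]
    exact hinner j t
  rw [houter, PySem.List.foldl_add]
  simp [pv_sum_range]

-- sum over enumerate(xs, s) as a sum over indices
theorem pv_enum_sum (F : Int → List Char → Int) :
    ∀ (xs : List (List Char)) (s : Int),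
    ((PySem.List.enumerate xs s).map (fun p => F p.1 p.2)).sum
      = ((List.range xs.length).map (fun (k : Nat) => F (s + (k : Int)) (xs.getD k []))).sum := by
  intro xs
  induction xs with
  | nil => intro s; simp [PySem.List.enumerate_nil]
  | cons x xs ih =>
    intro s
    rw [PySem.List.enumerate_cons, List.map_cons, List.sum_cons, ih (s + 1)]
    rw [List.length_cons, List.range_succ_eq_map, List.map_cons, List.sum_cons, List.map_map]
    congr 1
    · simp
    · apply congrArg List.sum
      apply List.map_congr_left
      intro k _
      simp only [Function.comp_apply, List.getD_cons_succ]
      congr 1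
      push_cast
      ring

-- weight × count of 'O' in the first w cells, as a sum over the columns
theorem pv_row (c : Int) : ∀ (r : List Char) (w : Nat), w ≤ r.length →
    c * (((r.take w).count 'O' : Nat) : Int)
      = ((List.range w).map (fun j => if r.getD j ' ' = 'O' then c else 0)).sum := by
  intro r
  induction r with
  | nil =>
    intro w hw
    have : w = 0 := by simpa using hw
    subst this; simp
  | cons a r' ih =>
    intro w hw
    cases w with
    | zero => simp
    | succ v =>
      rw [List.take_succ_cons, List.count_cons]
      rw [List.range_succ_eq_map, List.map_cons, List.sum_cons, List.map_map]
      have hmap : (List.range v).map ((fun j => if (a :: r').getD j ' ' = 'O' then c else 0) ∘ Nat.succ)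
          = (List.range v).map (fun j => if r'.getD j ' ' = 'O' then c else 0) := by
        apply List.map_congr_left
        intro k _
        simp
      rw [hmap, ← ih v (by simpa using hw)]
      simp only [List.getD_cons_zero, beq_iff_eq]
      split_ifs with h <;> (push_cast; ring)

-- B as the transposed double sum: rows outside, columns inside
theorem pv_B_sum (G : List String) :
    compute_alt G =
      ∑ i ∈ Finset.range (G.map String.toList).length,
        ∑ j ∈ Finset.range (pyMinLen (G.map String.toList)),
          pvCell (G.map String.toList) (G.map String.toList).length i j := by
  set L := G.map String.toList with hL
  show ((PySem.List.enumerate L).map (fun p =>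
      ((L.length : Int) - p.1) * ((PySem.List.count (PySem.List.slice p.2 none
        (some (PySem.List.minD (L.map (fun r => PySem.List.len r)) (fun x => x) 0))) 'O' : Nat) : Int))).sum = _
  rw [pv_minD_eq_minLen]
  simp only [PySem.List.slice_to_natCast, PySem.List.count_eq]
  rw [pv_enum_sum (fun i r => ((L.length : Int) - i) * (((r.take (pyMinLen L)).count 'O' : Nat) : Int)) L 0]
  rw [pv_sum_range]
  apply Finset.sum_congr rfl
  intro i hi
  have hi' : i < L.length := Finset.mem_range.mp hi
  have hmem : L.getD i [] ∈ L := by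
    rw [List.getD_eq_getElem L [] hi']
    exact List.getElem_mem hi'
  rw [zero_add]
  rw [pv_row ((L.length : Int) - (i : Int)) (L.getD i []) (pyMinLen L) (pv_minLen_le L _ hmem)]
  rw [pv_sum_range]
  apply Finset.sum_congr rfl
  intro j _
  unfold pvCell
  rfl

-- ===== VERDICT (by name: the statement is the Claim_ definition above) =====
theorem compute_spec : Claim_equal_compute := by
  intro G _
  show compute G = compute_alt G
  rw [pv_A_sum, pv_B_sum, Finset.sum_comm]
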